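-- pv_equiv track=rewrite | github.com/simoncellibastien/Password_Generator | algo.py | chooseKeyLength
-- ===== SOURCE A (Python) =====
-- def chooseKeyLength(key):
--     length_for_key = None
--     list_of_lengths = []
--     # Permit to choose a length to have a square matrix
--     for i in range(8,41):
--         list_of_lengths.append(i*i)
--     for length in list_of_lengths:
--         if length < len(key):
--             length_for_key = length
--         else:
--             break
--     if not length_for_key: # if key too small => affect 64 for length
--         length_for_key = 64
--     return length_for_key
-- ===== SOURCE B (Python) =====
-- def chooseKeyLength(key):
--     n = len(key)
--     if n <= 64:
--         return 64
--     # binary search for the largest i in [8, 40] with i*i < n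
--     lo, hi = 8, 40
--     while lo < hi:
--         mid = (lo + hi + 1) // 2
--         if mid * mid < n:
--             lo = mid
--         else:
--             hi = mid - 1
--     return lo * lo
-- ===== Notes on version B (the rewrite author's own statement) =====
-- stated objective: alternative
-- what changed: Replaces building the list of squares 8^2..40^2 and linearly scanning it with a binary search over i in [8,40] for the largest i with i*i < len(key), after an explicit n <= 64 default guard.
import Mathlib
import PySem

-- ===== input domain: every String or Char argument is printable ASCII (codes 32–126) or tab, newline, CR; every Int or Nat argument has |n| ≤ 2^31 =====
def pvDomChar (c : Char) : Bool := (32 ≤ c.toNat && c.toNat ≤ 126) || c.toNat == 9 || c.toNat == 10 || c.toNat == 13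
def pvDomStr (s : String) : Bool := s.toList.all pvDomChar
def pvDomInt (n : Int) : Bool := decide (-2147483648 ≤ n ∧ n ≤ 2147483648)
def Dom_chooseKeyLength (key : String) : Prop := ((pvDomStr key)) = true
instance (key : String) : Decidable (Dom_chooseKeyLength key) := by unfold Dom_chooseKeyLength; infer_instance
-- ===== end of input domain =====

-- B replaces A's square-list build + linear scan by a binary search over [8,40]; objective: alternative (same O(1) cost).

-- ===== PORT A =====
-- the scan loop with break, over the list of squares; n = len(key)
def pvScanA (n : Int) : Option Int → List Int → Option Int
  | acc, [] => acc
  | acc, l :: rest => if l < n then pvScanA n (some l) rest else acc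

def pvSquares : List Int := (PySem.List.pyRange 8 41 1).foldl (fun acc i => acc ++ [i * i]) []

def pvBodyA (n : Int) : Int :=
  match pvScanA n none pvSquares with
  | none => 64                              -- 'if not length_for_key'
  | some v => if v = 0 then 64 else v       -- (None or 0 are falsy; 0 never occurs)

def chooseKeyLength (key : String) : Int := pvBodyA (PySem.Str.len key)

-- ===== PORT B =====
-- the while loop, as structural recursion on a fuel that bounds the shrinking gap hi - lo
def pvBsearchGo (n : Int) : Nat → Int → Int → Int
  | 0, lo, _ => lo
  | fuel + 1, lo, hi =>
    if lo < hi then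
      let mid := PySem.Int.floordiv (lo + hi + 1) 2
      if mid * mid < n then pvBsearchGo n fuel mid hi else pvBsearchGo n fuel lo (mid - 1)
    else lo

def pvBsearch (n lo hi : Int) : Int := pvBsearchGo n (hi - lo).toNat lo hi

def pvBodyB (n : Int) : Int :=
  if n ≤ 64 then 64
  else
    let r := pvBsearch n 8 40
    r * r

def chooseKeyLength_alt (key : String) : Int := pvBodyB (PySem.Str.len key)

-- ===== PRECONDITION & SPEC =====
def Spec_chooseKeyLength (key : String) (out : Int) : Prop := out = chooseKeyLength_alt key
instance (key : String) (out : Int) : Decidable (Spec_chooseKeyLength key out) := by unfold Spec_chooseKeyLength; infer_instance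

-- ===== CLAIM (what is proved, stated in full; the proofs are below) =====
def Claim_equal_chooseKeyLength : Prop := ∀ (key : String), Dom_chooseKeyLength key → Spec_chooseKeyLength key (chooseKeyLength key)

-- ===== LEMMAS AND PROOFS =====

-- small lengths: finite kernel check for every n ≤ 1601
set_option maxRecDepth 40000 in
lemma pv_small : ∀ m ∈ List.range 1602, pvBodyA (m : Int) = pvBodyB (m : Int) := by
  decide

-- the scan returns the last element when every element is below n
lemma pvScanA_all_lt (n : Int) :
    ∀ (l : List Int) (acc : Option Int), l ≠ [] → (∀ x ∈ l, x < n) →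
      pvScanA n acc l = l.getLast? := by
  intro l
  induction l with
  | nil => intro acc h; exact absurd rfl h
  | cons x rest ih =>
    intro acc _ hall
    have hx : x < n := hall x (by simp)
    have hstep : pvScanA n acc (x :: rest) = pvScanA n (some x) rest := by
      simp [pvScanA, hx]
    cases rest with
    | nil => simp [pvScanA, hx]
    | cons y r =>
      rw [hstep, ih (some x) (by simp) (fun z hz => hall z (by simp [hz])),
        List.getLast?_cons_cons]

lemma pv_bsearch_all (n : Int) (hn : 1600 < n) :
    ∀ (fuel : Nat) (lo hi : Int), 0 ≤ lo → lo ≤ hi → hi ≤ 40 → (hi - lo).toNat ≤ fuel →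
      pvBsearchGo n fuel lo hi = hi := by
  intro fuel
  induction fuel with
  | zero => intro lo hi h0 hle h40 hf; simp only [pvBsearchGo]; omega
  | succ k ih =>
    intro lo hi h0 hle h40 hf
    rw [pvBsearchGo]
    by_cases h : lo < hi
    · have hmid : PySem.Int.floordiv (lo + hi + 1) 2 = (lo + hi + 1) / 2 :=
        PySem.Int.floordiv_eq_ediv_of_pos (by norm_num)
      simp only [h, if_pos, hmid]
      set mid := (lo + hi + 1) / 2 with hm
      have hb1 : lo + 1 ≤ mid := by omega
      have hb2 : mid ≤ hi := by omega
      have hmlt : mid * mid < n := by nlinarith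
      simp only [hmlt, if_pos]
      exact ih mid hi (by omega) hb2 h40 (by omega)
    · simp only [h, if_neg, not_false_iff]; omega

lemma pv_body_eq (n : Int) (hn : 0 ≤ n) : pvBodyA n = pvBodyB n := by
  by_cases hsmall : n ≤ 1601
  · have : n = ((n.toNat : Nat) : Int) := by omega
    rw [this]
    exact pv_small n.toNat (by simp [List.mem_range]; omega)
  · -- n ≥ 1602: A scans to the last square 1600, B's search climbs to 40
    have hA : pvBodyA n = 1600 := by
      have hmem : ∀ x ∈ pvSquares, x ≤ 1600 := by decide
      have hscan : pvScanA n none pvSquares = some 1600 := by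
        rw [pvScanA_all_lt n pvSquares none (by decide)
          (fun x hx => lt_of_le_of_lt (hmem x hx) (by omega))]
        decide
      simp [pvBodyA, hscan]
    have hB : pvBodyB n = 1600 := by
      unfold pvBodyB
      rw [if_neg (by omega)]
      have := pv_bsearch_all n (by omega) 32 8 40 (by norm_num) (by norm_num)
        (by norm_num) (by decide)
      simp [pvBsearch, this]
    rw [hA, hB]

-- ===== VERDICT (by name: the statement is the Claim_ definition above) =====
theorem chooseKeyLength_spec : Claim_equal_chooseKeyLength := by
  intro key _
  unfold Spec_chooseKeyLength chooseKeyLength chooseKeyLength_alt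
  exact pv_body_eq _ (by rw [PySem.Str.len_eq]; exact Int.natCast_nonneg _)
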